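-- pv_equiv track=rewrite | github.com/UniTy01/Jarvismax-master | core/self_improvement/codebase_awareness.py | _classify_layer
-- ===== SOURCE A (Python) =====
-- ARCHITECTURE_LAYERS = {
--     "kernel": ["kernel/"],
--     "core": ["core/"],
--     "execution": ["executor/"],
--     "planning": ["core/planning/"],
--     "api": ["api/"],
--     "business": ["business/", "core/business/"],
--     "ui": ["static/", "jarvismax_app/"],
--     "test": ["tests/"],
--     "config": ["config/"],
--     "connector": ["connectors/"],
-- }
--
-- def _classify_layer(filepath: str) -> str:
--     """Determine which architectural layer a file belongs to.
--
--     Checks most specific prefixes first (longest match wins).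
--     """
--     best_layer = "other"
--     best_len = 0
--     for layer, prefixes in ARCHITECTURE_LAYERS.items():
--         for prefix in prefixes:
--             if filepath.startswith(prefix) and len(prefix) > best_len:
--                 best_layer = layer
--                 best_len = len(prefix)
--     return best_layer
-- ===== SOURCE B (Python) =====
-- ARCHITECTURE_LAYERS = {
--     "kernel": ["kernel/"],
--     "core": ["core/"],
--     "execution": ["executor/"],
--     "planning": ["core/planning/"],
--     "api": ["api/"],
--     "business": ["business/", "core/business/"],
--     "ui": ["static/", "jarvismax_app/"],
--     "test": ["tests/"],
--     "config": ["config/"],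
--     "connector": ["connectors/"],
-- }
--
-- # Flat (prefix, layer) index sorted once, longest prefix first (stable sort keeps
-- # dict order among equal lengths, matching A's strict-greater tie-breaking).
-- _PREFIX_INDEX = sorted(
--     ((prefix, layer) for layer, prefixes in ARCHITECTURE_LAYERS.items() for prefix in prefixes),
--     key=lambda pl: len(pl[0]),
--     reverse=True,
-- )
--
-- def _classify_layer(filepath: str) -> str:
--     for prefix, layer in _PREFIX_INDEX:
--         if filepath.startswith(prefix):
--             return layer
--     return "other"
-- ===== Notes on version B (the rewrite author's own statement) =====
-- stated objective: alternative
-- what changed: Replaces A's scan over all (layer, prefixes) pairs with best-length tracking by a module-level flat (prefix, layer) index sorted once by descending prefix length, scanned with early return on the first matching prefix.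
import Mathlib
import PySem

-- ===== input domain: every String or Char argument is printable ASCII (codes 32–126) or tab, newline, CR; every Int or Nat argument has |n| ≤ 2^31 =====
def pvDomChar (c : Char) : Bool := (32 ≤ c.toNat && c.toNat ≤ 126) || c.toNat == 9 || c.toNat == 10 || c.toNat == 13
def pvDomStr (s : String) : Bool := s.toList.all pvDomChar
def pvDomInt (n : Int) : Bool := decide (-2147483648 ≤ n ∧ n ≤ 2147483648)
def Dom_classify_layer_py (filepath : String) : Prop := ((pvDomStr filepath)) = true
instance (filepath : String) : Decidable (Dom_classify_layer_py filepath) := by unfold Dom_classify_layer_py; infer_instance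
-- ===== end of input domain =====

-- B replaces A's scan-all-with-best-length tracking by a flat (prefix, layer) index
-- sorted once by descending prefix length and scanned with early return (alternative decomposition).


-- ===== PORT A =====
-- ARCHITECTURE_LAYERS as an insertion-ordered association list
def architectureLayers : List (String × List String) :=
  [("kernel", ["kernel/"]), ("core", ["core/"]), ("execution", ["executor/"]),
   ("planning", ["core/planning/"]), ("api", ["api/"]),
   ("business", ["business/", "core/business/"]), ("ui", ["static/", "jarvismax_app/"]),
   ("test", ["tests/"]), ("config", ["config/"]), ("connector", ["connectors/"])]

def classify_layer_py (filepath : String) : String :=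
  (architectureLayers.foldl
    (fun st lp =>
      lp.2.foldl
        (fun st2 pre =>
          if PySem.Str.startswith filepath pre && decide (PySem.Str.len pre > st2.2)
          then (lp.1, PySem.Str.len pre) else st2)
        st)
    ("other", (0 : Int))).1

-- ===== PORT B =====
-- module-level flat index: (prefix, layer) pairs sorted by prefix length, longest first (stable)
def prefixIndex : List (String × String) :=
  PySem.List.sorted
    (architectureLayers.flatMap (fun lp => lp.2.map (fun pre => (pre, lp.1))))
    (fun pl => PySem.Str.len pl.1) (reverse := true)

-- the early-return loop over the index
def scanIndex (filepath : String) : List (String × String) → String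
  | [] => "other"
  | (pre, layer) :: rest =>
      if PySem.Str.startswith filepath pre then layer else scanIndex filepath rest

def classify_layer_py_alt (filepath : String) : String :=
  scanIndex filepath prefixIndex

-- ===== PRECONDITION & SPEC =====
def Spec_classify_layer_py (filepath : String) (out : String) : Prop := out = classify_layer_py_alt filepath
instance (filepath : String) (out : String) : Decidable (Spec_classify_layer_py filepath out) := by unfold Spec_classify_layer_py; infer_instance

-- ===== CLAIM (what is proved, stated in full; the proofs are below) =====
def Claim_equal_classify_layer_py : Prop := ∀ (filepath : String), Dom_classify_layer_py filepath → Spec_classify_layer_py filepath (classify_layer_py filepath)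

-- ===== LEMMAS AND PROOFS =====

-- one update step of A's best-match fold, with the startswith test abstracted to a Bool
def stepA (b : Bool) (layer pre : String) (st : String × Int) : String × Int :=
  if b && decide (PySem.Str.len pre > st.2) then (layer, PySem.Str.len pre) else st

-- A's whole fold with the 12 startswith tests abstracted (dict iteration order)
def chainA (c1 c2 c3 c4 c5 c6 c7 c8 c9 c10 c11 c12 : Bool) : String × Int :=
  stepA c12 "connector" "connectors/" (stepA c11 "config" "config/" (stepA c10 "test" "tests/"
    (stepA c9 "ui" "jarvismax_app/" (stepA c8 "ui" "static/" (stepA c7 "business" "core/business/"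
      (stepA c6 "business" "business/" (stepA c5 "api" "api/" (stepA c4 "planning" "core/planning/"
        (stepA c3 "execution" "executor/" (stepA c2 "core" "core/"
          (stepA c1 "kernel" "kernel/" ("other", (0 : Int)))))))))))))

-- B's early-return scan with the tests abstracted (longest-first index order)
def chainB (d1 d2 d3 d4 d5 d6 d7 d8 d9 d10 d11 d12 : Bool) : String :=
  if d1 then "planning" else if d2 then "business" else if d3 then "ui"
  else if d4 then "connector" else if d5 then "execution" else if d6 then "business"
  else if d7 then "kernel" else if d8 then "ui" else if d9 then "config"
  else if d10 then "test" else if d11 then "core" else if d12 then "api" else "other"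

-- the sorted index evaluates to this literal list (kernel computation)
theorem prefixIndex_eval :
    prefixIndex =
      [("core/planning/", "planning"), ("core/business/", "business"),
       ("jarvismax_app/", "ui"), ("connectors/", "connector"), ("executor/", "execution"),
       ("business/", "business"), ("kernel/", "kernel"), ("static/", "ui"),
       ("config/", "config"), ("tests/", "test"), ("core/", "core"), ("api/", "api")] := by
  decide

-- A's port is chainA applied to the concrete startswith tests
theorem A_eq (fp : String) :
    classify_layer_py fp =
      (chainA (PySem.Str.startswith fp "kernel/") (PySem.Str.startswith fp "core/")
        (PySem.Str.startswith fp "executor/") (PySem.Str.startswith fp "core/planning/")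
        (PySem.Str.startswith fp "api/") (PySem.Str.startswith fp "business/")
        (PySem.Str.startswith fp "core/business/") (PySem.Str.startswith fp "static/")
        (PySem.Str.startswith fp "jarvismax_app/") (PySem.Str.startswith fp "tests/")
        (PySem.Str.startswith fp "config/") (PySem.Str.startswith fp "connectors/")).1 := rfl

-- B's port is chainB applied to the same tests, in index order
theorem B_eq (fp : String) :
    classify_layer_py_alt fp =
      chainB (PySem.Str.startswith fp "core/planning/") (PySem.Str.startswith fp "core/business/")
        (PySem.Str.startswith fp "jarvismax_app/") (PySem.Str.startswith fp "connectors/")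
        (PySem.Str.startswith fp "executor/") (PySem.Str.startswith fp "business/")
        (PySem.Str.startswith fp "kernel/") (PySem.Str.startswith fp "static/")
        (PySem.Str.startswith fp "config/") (PySem.Str.startswith fp "tests/")
        (PySem.Str.startswith fp "core/") (PySem.Str.startswith fp "api/") := by
  rw [classify_layer_py_alt, prefixIndex_eval]; rfl

-- the abstract chains agree on every combination of test outcomes
set_option maxRecDepth 8000 in
theorem chains_agree : ∀ c1 c2 c3 c4 c5 c6 c7 c8 c9 c10 c11 c12 : Bool,
    (chainA c1 c2 c3 c4 c5 c6 c7 c8 c9 c10 c11 c12).1 =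
      chainB c4 c7 c9 c12 c3 c6 c1 c8 c11 c10 c2 c5 := by decide

-- ===== VERDICT (by name: the statement is the Claim_ definition above) =====
theorem classify_layer_py_spec : Claim_equal_classify_layer_py := by
  intro fp _
  unfold Spec_classify_layer_py
  rw [A_eq, B_eq, chains_agree]
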